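-- pv_equiv track=rewrite | github.com/Roua-Khalfet/Nexaura | backend/tech-agent/technical_advisor_agent/nodes/github_discovery.py | _primary_language
-- ===== SOURCE A (Python) =====
-- from typing import List
--
-- def _primary_language(existing_stack: List[str]) -> str:
--     lower = [s.lower() for s in existing_stack or []]
--     if any("python" in s for s in lower):
--         return "python"
--     if any("typescript" in s or "javascript" in s or "node" in s for s in lower):
--         return "typescript"
--     if any("java" in s for s in lower):
--         return "java"
--     if any("go" == s or "golang" in s for s in lower):
--         return "go"
--     return ""
-- ===== SOURCE B (Python) =====
-- def _primary_language(existing_stack):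
--     lower = [s.lower() for s in existing_stack or []]
--     best = None  # minimal priority index seen so far
--     for s in lower:
--         if "python" in s:
--             k = 0
--         elif "typescript" in s or "javascript" in s or "node" in s:
--             k = 1
--         elif "java" in s:
--             k = 2
--         elif "go" == s or "golang" in s:
--             k = 3
--         else:
--             continue
--         if best is None or k < best:
--             best = k
--     return "" if best is None else ["python", "typescript", "java", "go"][best]
-- ===== Notes on version B (the rewrite author's own statement) =====
-- stated objective: alternative
-- what changed: Replaced A's four sequential any-scans over the whole list by a single pass that computes each string's highest-priority category and keeps the minimum priority index, mapped to its label at the end.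
import Mathlib
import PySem

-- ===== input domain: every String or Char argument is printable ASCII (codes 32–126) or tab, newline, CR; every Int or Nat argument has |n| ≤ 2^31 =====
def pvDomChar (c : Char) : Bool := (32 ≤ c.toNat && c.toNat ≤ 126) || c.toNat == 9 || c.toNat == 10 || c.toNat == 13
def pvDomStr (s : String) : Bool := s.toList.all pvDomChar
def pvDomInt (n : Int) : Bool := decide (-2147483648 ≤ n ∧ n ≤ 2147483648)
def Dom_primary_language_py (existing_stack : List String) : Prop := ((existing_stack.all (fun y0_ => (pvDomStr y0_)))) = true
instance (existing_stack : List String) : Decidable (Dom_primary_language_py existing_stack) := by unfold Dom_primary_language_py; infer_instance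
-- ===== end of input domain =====

-- B makes one pass keeping the minimal matched priority instead of A's four sequential any-scans; objective: alternative decomposition.
-- ===== PORT A =====
-- ('existing_stack or []' is 'existing_stack' itself when empty, so the map over existing_stack is exact)
def primary_language_py (existing_stack : List String) : String :=
  let lower := existing_stack.map (fun s => PySem.Str.lower s)
  if lower.any (fun s => PySem.Str.isIn "python" s) then "python"
  else if lower.any (fun s => PySem.Str.isIn "typescript" s || PySem.Str.isIn "javascript" s || PySem.Str.isIn "node" s) then "typescript"
  else if lower.any (fun s => PySem.Str.isIn "java" s) then "java"
  else if lower.any (fun s => "go" == s || PySem.Str.isIn "golang" s) then "go"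
  else ""

-- ===== PORT B =====
-- per-string priority (the if/elif chain computing k in Source B)
def pvPrio (s : String) : Option Nat :=
  if PySem.Str.isIn "python" s then some 0
  else if PySem.Str.isIn "typescript" s || PySem.Str.isIn "javascript" s || PySem.Str.isIn "node" s then some 1
  else if PySem.Str.isIn "java" s then some 2
  else if "go" == s || PySem.Str.isIn "golang" s then some 3
  else none

-- the loop body updating best in Source B
def pvStep (best : Option Nat) (s : String) : Option Nat :=
  match pvPrio s with
  | none => best
  | some k =>
    match best with
    | none => some k
    | some b => some (if k < b then k else b)

def pvLabel : Option Nat → String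
  | some 0 => "python"
  | some 1 => "typescript"
  | some 2 => "java"
  | some 3 => "go"
  | _ => ""

def primary_language_py_alt (existing_stack : List String) : String :=
  let lower := existing_stack.map (fun s => PySem.Str.lower s)
  pvLabel (lower.foldl pvStep none)

-- ===== PRECONDITION & SPEC =====
def Spec_primary_language_py (existing_stack : List String) (out : String) : Prop := out = primary_language_py_alt existing_stack
instance (existing_stack : List String) (out : String) : Decidable (Spec_primary_language_py existing_stack out) := by unfold Spec_primary_language_py; infer_instance

-- ===== CLAIM (what is proved, stated in full; the proofs are below) =====
def Claim_equal_primary_language_py : Prop := ∀ (existing_stack : List String), Dom_primary_language_py existing_stack → Spec_primary_language_py existing_stack (primary_language_py existing_stack)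

-- ===== LEMMAS AND PROOFS =====
def pvMin : Option Nat → Option Nat → Option Nat
  | none, b => b
  | some a, none => some a
  | some a, some b => some (min a b)

-- closed form of the fold's result over a list, as A's if-chain of anys
def pvF (l : List String) : Option Nat :=
  if l.any (fun s => PySem.Str.isIn "python" s) then some 0
  else if l.any (fun s => PySem.Str.isIn "typescript" s || PySem.Str.isIn "javascript" s || PySem.Str.isIn "node" s) then some 1
  else if l.any (fun s => PySem.Str.isIn "java" s) then some 2
  else if l.any (fun s => "go" == s || PySem.Str.isIn "golang" s) then some 3
  else none

theorem pvStep_eq (b : Option Nat) (s : String) : pvStep b s = pvMin b (pvPrio s) := by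
  unfold pvStep
  cases pvPrio s with
  | none => cases b <;> rfl
  | some k =>
    cases b with
    | none => rfl
    | some a => simp only [pvMin, Option.some.injEq]; split_ifs <;> omega

theorem pvMin_assoc (a b c : Option Nat) : pvMin (pvMin a b) c = pvMin a (pvMin b c) := by
  cases a <;> cases b <;> cases c <;> simp [pvMin, Nat.min_assoc]

set_option maxHeartbeats 1000000 in
theorem pvF_cons (x : String) (xs : List String) : pvF (x :: xs) = pvMin (pvPrio x) (pvF xs) := by
  unfold pvF pvPrio
  simp only [List.any_cons]
  by_cases h0 : PySem.Str.isIn "python" x = true <;>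
  by_cases h1 : (PySem.Str.isIn "typescript" x || PySem.Str.isIn "javascript" x || PySem.Str.isIn "node" x) = true <;>
  by_cases h2 : PySem.Str.isIn "java" x = true <;>
  by_cases h3 : ("go" == x || PySem.Str.isIn "golang" x) = true <;>
  simp only [h0, h1, h2, h3, Bool.true_or, Bool.false_or, if_true] <;>
  split_ifs <;> simp_all [pvMin]

theorem pvFold_eq (l : List String) : ∀ b : Option Nat, l.foldl pvStep b = pvMin b (pvF l) := by
  induction l with
  | nil => intro b; cases b <;> rfl
  | cons x xs ih =>
    intro b
    simp only [List.foldl_cons, pvStep_eq, ih, pvF_cons, pvMin_assoc]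

-- ===== VERDICT (by name: the statement is the Claim_ definition above) =====
theorem pvMin_none (o : Option Nat) : pvMin none o = o := rfl

theorem primary_language_py_spec : Claim_equal_primary_language_py := by
  intro existing_stack _
  unfold Spec_primary_language_py primary_language_py primary_language_py_alt
  dsimp only
  rw [pvFold_eq, pvMin_none]
  unfold pvF
  split_ifs <;> rfl
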